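/- GENERATED by mk_final_copies.py from the proof of the farm's unit `vorbis_decode_initial.3` (farm:vorbis_decode_initial.3.1: Proof.lean) as the
   re-elaboration sweep compiled it — do not edit. -/
import Asan.CheckWalk
import Vorbis.Spec.Units.vorbis_decode_initial_3

open X86 X86.User Asan Vorbis Vorbis.Spec
open Vorbis.Spec.vorbis_decode_initial

set_option maxRecDepth 4000
set_option maxHeartbeats 4000000

/-- Segment 3 of `vorbis_decode_initial` (0x1131eb–0x1131f8, 5 instructions; stb_vorbis_fixed.c 3165–3166:
`while (EOP != get8_packet(f)); goto retry;`): ONE ROUND of the drain loop, from `IAt loop2` to `IAt loop2` with μ strictly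
smaller (`jne` taken: a byte was returned, get8_packet's `strict` clause) or (EOP) over `jmp retry` to `IAt loop1` with μ not
larger. A SEGMENT proof: the walk starts at `v` in the middle of the function; `u` is the state at the function's entry
(`IEntered`). The only callee is get8_packet; the nine stack slots and the two zeroed fields are carried over the call by
`u_frame`, the footprint by `Reader.sameExcept_through_callee`. -/
theorem Vorbis.Spec.Worked.vorbis_decode_initial_3_ok : Vorbis.Spec.vorbis_decode_initial_3.Statement := by
  intro Lay hLay μ hμ u₀ hcode h_g8 others frames len A stored room ysz u ret v hE hat
  have he := hE.entry
  have hpre := hE.pre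
  have hg8 := h_g8 others frames (RunBlk A len) len
  clear h_g8 hE
  v_entry he
  obtain ⟨hsh, hinv, hpls, hple, hprs, hpre_, hpm, hapart⟩ := hpre
  have hsp := hsh.rsp
  have hobj := hinv.objLive
  have hwhere := hobj.where_ hsh.inv hsh.offText (by decide)
  simp only [Off.sizeof.stb_vorbis] at hwhere
  have henv := hinv.readerEnv
  clear hinv hapart
  obtain ⟨w_rip, w_rsp, w_rbx, w_r12, w_r13, w_r14, w_kept, w_eq, hsame, hun, hs0, hs1, hs2, hs3, hs4, hs5, hs6, hs7, hs8,
    hdf, hmx, hbits, hcbs, hcbe⟩ := hat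
  unfold iLoopRegs at w_kept
  u_walk hcode [hμ.vendor] until [Vorbis.L.vorbis_decode_initial.loop1, Vorbis.L.vorbis_decode_initial.loop2] span [Vorbis.L.textLo, Vorbis.L.textHi] side (v_side)
  case call_inv =>
    v_inv
  case pre_1131ee =>
    have hun' : ShadowUntouched u.mem s_1131ee.mem := by v_untouched
    have hsh' : ShadowPre others frames s_1131ee := hsh.call hun' (by u_omega) (by u_omega) (by u_omega)
    have hkeep := Reader.store_off_obj hbits (u.reg .rsp - 96) 8 1126899 (by u_omega) (by u_omega)
    rw [← w_mem] at hkeep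
    refine ⟨hsh', ?_, ?_⟩
    · rw [w_rdi]
      exact henv
    · rw [w_rdi]
      exact hkeep.1.bits
  -- 0x1131f3, the state the callee returned
  have c_rdi := w_rdi_1131ee
  v_after_call w_rsp_1131ee w_mem_1131ee
  simp only [c_rdi] at w_same
  have hpost : Get8PacketPost (RunBlk A len) len (u.reg .rdi).toNat s_1131ee s_1131eer := by
    rw [← c_rdi]
    exact w_post
  have hkeep := Reader.store_off_obj hbits (u.reg .rsp - 96) 8 1126899 (by u_omega) (by u_omega)
  rw [← w_mem_1131ee] at hkeep
  have hs0r : UInt64.ofNat (s_1131eer.mem.readLE (u.reg .rsp) 8) = ret := by u_frame hs0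
  have hs1r : UInt64.ofNat (s_1131eer.mem.readLE (u.reg .rsp - 8) 8) = u.reg .r15 := by u_frame hs1
  have hs2r : UInt64.ofNat (s_1131eer.mem.readLE (u.reg .rsp - 16) 8) = u.reg .r14 := by u_frame hs2
  have hs3r : UInt64.ofNat (s_1131eer.mem.readLE (u.reg .rsp - 24) 8) = u.reg .r13 := by u_frame hs3
  have hs4r : UInt64.ofNat (s_1131eer.mem.readLE (u.reg .rsp - 32) 8) = u.reg .r12 := by u_frame hs4
  have hs5r : UInt64.ofNat (s_1131eer.mem.readLE (u.reg .rsp - 40) 8) = u.reg .rbp := by u_frame hs5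
  have hs6r : UInt64.ofNat (s_1131eer.mem.readLE (u.reg .rsp - 48) 8) = u.reg .rbx := by u_frame hs6
  have hs7r : UInt64.ofNat (s_1131eer.mem.readLE (u.reg .rsp - 80) 8) = u.reg .rcx := by u_frame hs7
  have hs8r : UInt64.ofNat (s_1131eer.mem.readLE (u.reg .rsp - 72) 8) = u.reg .r8 := by u_frame hs8
  have hcbsr : s_1131eer.mem.readLE (u.reg .rdi + 1800) 4 = 0 := by u_frame hcbs
  have hcber : s_1131eer.mem.readLE (u.reg .rdi + 1796) 4 = 0 := by u_frame hcbe
  have hunr : ShadowUntouched u.mem s_1131eer.mem := by v_untouched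
  have hpush : Mem.SameExcept _ u.mem (v.mem.writeLE (u.reg .rsp - 96) 8 1126899) :=
    Mem.SameExcept.step_writeLE' (u.reg .rsp - 96) 8 1126899 hsame (by u_omega) (by u_same_side)
  have hsamer := Reader.sameExcept_through_callee hpush w_same (by
    simp only [List.forall_mem_cons, List.not_mem_nil, false_imp_iff, implies_true, and_true, X86.User.inSpans_cons,
      X86.User.inSpans_nil, or_false]
    repeat' apply And.intro
    all_goals u_omega)
  have hbitsr : Bits (RunBlk A len) len s_1131eer.mem (u.reg .rdi).toNat := hpost.reader.bits
  have hmur : mu s_1131eer.mem (u.reg .rdi).toNat ≤ mu v.mem (u.reg .rdi).toNat :=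
    Nat.le_trans hpost.reader.mu_le hkeep.1.mu_le
  have hstrict : s_1131eer.reg .rax ≠ EOP → mu s_1131eer.mem (u.reg .rdi).toNat < mu v.mem (u.reg .rdi).toNat := by
    intro hne
    exact Nat.lt_of_lt_of_le (hpost.strict hne) hkeep.1.mu_le
  have hres := hpost.result
  clear w_same hkeep hpush hpost w_post hsame hs0 hs1 hs2 hs3 hs4 hs5 hs6 hs7 hs8 hcbs hcbe hbits hun
  u_walk hcode [hμ.vendor] until [Vorbis.L.vorbis_decode_initial.loop1, Vorbis.L.vorbis_decode_initial.loop2] span [Vorbis.L.textLo, Vorbis.L.textHi] side (v_side)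
  · -- 0x1131f6 `jne` taken, the back edge: a byte was returned, μ is strictly smaller
    have hne : s_1131eer.reg .rax ≠ EOP := by
      intro h
      rw [h, Asan.part32_toNat] at hbr_1131f6
      exact hbr_1131f6 (by decide)
    have hlt := hstrict hne
    refine ReachVia.done (Or.inr ⟨?_, ?_⟩)
    · refine ⟨w_rip, w_rsp, w_rbx, w_r12, w_r13, w_r14, w_kept.mono_all (by rfl), w_eq, ?_, ?_, ?_, ?_, ?_, ?_, ?_, ?_, ?_,
        ?_, ?_, ?_, ?_, ?_, ?_, ?_⟩
      all_goals try rw [w_mem]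
      all_goals first
        | (with_reducible assumption)
        | skip
      · rw [w_flags]
        simp only [X86.User.df_setStatus]
        exact w_df
      · rw [w_mxcsr]
        exact w_mx
    · rw [w_mem]
      exact hlt
  · -- the exit: EOP was returned; 0x1131f8 `jmp retry`
    refine ReachVia.done (Or.inl ⟨?_, ?_⟩)
    · refine ⟨w_rip, w_rsp, w_rbx, w_r12, w_r13, w_r14, w_kept.mono_all (by rfl), w_eq, ?_, ?_, ?_, ?_, ?_, ?_, ?_, ?_, ?_,
        ?_, ?_, ?_, ?_, ?_, ?_, ?_⟩
      all_goals try rw [w_mem]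
      all_goals first
        | (with_reducible assumption)
        | skip
      · rw [w_flags]
        simp only [X86.User.df_setStatus]
        exact w_df
      · rw [w_mxcsr]
        exact w_mx
    · rw [w_mem]
      omega
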